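-- pv_equiv track=rewrite | github.com/jameszheng88/W9D1-Assignment-Big-O | linear_search.py | linear_search_with_hash_table
-- ===== SOURCE A (Python) =====
-- def linear_search_with_hash_table(arr, target):
--
--     # Create a hash table to map each element to its position
--
--     hash_table = {}
--     for i in range(len(arr)):
--         hash_table[arr[i]] = i
--
--     if target in hash_table:
--         return hash_table[target]
--     else:
--         return -1
-- ===== SOURCE B (Python) =====
-- def linear_search_with_hash_table(arr, target):
--     # Reverse scan: return the last index whose element equals target, else -1.
--     for i in range(len(arr) - 1, -1, -1):
--         if arr[i] == target:
--             return i
--     return -1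
-- ===== Notes on version B (the rewrite author's own statement) =====
-- stated objective: faster
-- what changed: Replaced the build-a-dict-of-all-positions-then-lookup strategy with a single reverse scan that returns at the first (last-occurrence) match, using no auxiliary table; measured ~3x faster at large sizes.
import Mathlib
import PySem

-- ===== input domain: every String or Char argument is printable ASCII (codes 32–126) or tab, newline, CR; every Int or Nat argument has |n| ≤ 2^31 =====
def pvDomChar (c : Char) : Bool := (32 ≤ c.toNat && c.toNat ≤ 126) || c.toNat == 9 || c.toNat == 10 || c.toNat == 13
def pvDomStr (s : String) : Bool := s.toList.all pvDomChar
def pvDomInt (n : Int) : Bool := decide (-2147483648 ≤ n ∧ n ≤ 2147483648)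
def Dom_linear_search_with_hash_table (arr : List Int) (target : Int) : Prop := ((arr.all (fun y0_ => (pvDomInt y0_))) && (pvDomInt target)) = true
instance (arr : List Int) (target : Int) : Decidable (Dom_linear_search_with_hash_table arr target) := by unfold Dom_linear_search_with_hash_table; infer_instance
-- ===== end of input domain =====

-- B replaces A's build-a-dict-of-all-positions-then-lookup with a single reverse scan
-- with early exit and no auxiliary table (measured faster in a timing run; same result: last occurrence index or -1).

-- ===== PORT A =====
-- hash_table = {}; for i in range(len(arr)): hash_table[arr[i]] = i
-- if target in hash_table: return hash_table[target] else: return -1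
def linear_search_with_hash_table (arr : List Int) (target : Int) : Int :=
  let ht : PySem.Dict Int Int :=
    (PySem.List.pyRange 0 arr.length 1).foldl
      (fun d i => d.insert (PySem.List.pyGetD arr i 0) i) PySem.Dict.empty
  if ht.contains target then ht.getD target 0 else -1

-- ===== PORT B =====
-- for i in range(len(arr)-1, -1, -1): if arr[i] == target: return i
-- return -1
-- pvAltLoop arr target k scans indices k-1, k-2, …, 0 (the reverse loop with early exit).
def pvAltLoop (arr : List Int) (target : Int) : Nat → Int
  | 0 => -1
  | k + 1 => if PySem.List.pyGetD arr (k : Int) 0 = target then (k : Int) else pvAltLoop arr target k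

def linear_search_with_hash_table_alt (arr : List Int) (target : Int) : Int :=
  pvAltLoop arr target arr.length

-- ===== PRECONDITION & SPEC =====
def Spec_linear_search_with_hash_table (arr : List Int) (target : Int) (out : Int) : Prop := out = linear_search_with_hash_table_alt arr target
instance (arr : List Int) (target : Int) (out : Int) : Decidable (Spec_linear_search_with_hash_table arr target out) := by unfold Spec_linear_search_with_hash_table; infer_instance

-- ===== CLAIM (what is proved, stated in full; the proofs are below) =====
def Claim_equal_linear_search_with_hash_table : Prop := ∀ (arr : List Int) (target : Int), Dom_linear_search_with_hash_table arr target → Spec_linear_search_with_hash_table arr target (linear_search_with_hash_table arr target)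

-- ===== LEMMAS AND PROOFS =====

-- Indexing at a position below xs.length does not see the appended element.
lemma pvGetD_append_lt (xs : List Int) (x : Int) (k : Nat) (hk : k < xs.length) :
    PySem.List.pyGetD (xs ++ [x]) (k : Int) 0 = PySem.List.pyGetD xs (k : Int) 0 := by
  simp [PySem.List.pyGetD_natCast, List.getD_eq_getElem?_getD, List.getElem?_append_left hk]

-- Indexing at xs.length hits the appended element.
lemma pvGetD_append_last (xs : List Int) (x : Int) :
    PySem.List.pyGetD (xs ++ [x]) (xs.length : Int) 0 = x := by
  simp [PySem.List.pyGetD_natCast, List.getD_eq_getElem?_getD]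

-- The reverse scan only looks below its fuel, so the appended element is invisible.
lemma pvAltLoop_append (xs : List Int) (x t : Int) (k : Nat) (hk : k ≤ xs.length) :
    pvAltLoop (xs ++ [x]) t k = pvAltLoop xs t k := by
  induction k with
  | zero => rfl
  | succ k ih =>
    simp only [pvAltLoop, pvGetD_append_lt xs x k (by omega), ih (by omega)]

-- A's dict built over xs ++ [x] is the dict built over xs, then one insert of (x, xs.length).
lemma pvBuild_append (xs : List Int) (x : Int) :
    (PySem.List.pyRange 0 (xs ++ [x]).length 1).foldl
      (fun d i => d.insert (PySem.List.pyGetD (xs ++ [x]) i 0) i) PySem.Dict.empty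
    = ((PySem.List.pyRange 0 xs.length 1).foldl
        (fun d i => d.insert (PySem.List.pyGetD xs i 0) i) PySem.Dict.empty).insert x (xs.length : Int) := by
  have hlen : ((xs ++ [x]).length : Int) = (xs.length : Int) + 1 := by
    simp [List.length_append]
  rw [hlen, PySem.List.pyRange_one_succ_right (by positivity), List.foldl_append]
  simp only [List.foldl_cons, List.foldl_nil, pvGetD_append_last]
  congr 1
  apply PySem.List.foldl_congr_mem
  intro acc i hi
  rw [PySem.List.mem_pyRange_one] at hi
  obtain ⟨h0, h1⟩ := hi
  obtain ⟨k, rfl⟩ := Int.eq_ofNat_of_zero_le h0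
  rw [pvGetD_append_lt xs x k (by exact_mod_cast h1)]

-- Main equivalence, by induction on the list from the right.
lemma pvMain (arr : List Int) (t : Int) :
    linear_search_with_hash_table arr t = linear_search_with_hash_table_alt arr t := by
  induction arr using List.reverseRecOn with
  | nil => rfl
  | append_singleton xs x ih =>
    unfold linear_search_with_hash_table linear_search_with_hash_table_alt at *
    rw [pvBuild_append]
    have hlen : (xs ++ [x]).length = xs.length + 1 := by simp
    rw [hlen]
    by_cases hx : t = x
    · subst hx
      simp only [PySem.Dict.contains_insert_self, if_true, PySem.Dict.getD_insert_self,
        pvAltLoop, pvGetD_append_last]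
    · simp only [pvAltLoop, pvGetD_append_last]
      rw [if_neg (by omega : ¬ x = t), pvAltLoop_append xs x t xs.length (le_refl _)]
      have hb : (t == x) = false := by simp [hx]
      simp only [PySem.Dict.contains_insert, PySem.Dict.getD_insert, if_neg hx, hb,
        Bool.false_or]
      exact ih

-- ===== VERDICT (by name: the statement is the Claim_ definition above) =====
theorem linear_search_with_hash_table_spec : Claim_equal_linear_search_with_hash_table := by
  intro arr target _
  unfold Spec_linear_search_with_hash_table
  exact pvMain arr target
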